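-- pv_equiv track=rewrite | github.com/bmw02061993-cloud/ubibot | bot.py | get_stage
-- ===== SOURCE A (Python) =====
-- STAGES = {1:300, 2:600, 3:1500, 4:2000, 5:3000, 6:4000, 7:5000, 8:6000, 9:7000, 10:8000, 11:9000, 12:10000}
--
-- def get_stage(points):
--     stage = 0
--     for s, t in STAGES.items():
--         if points >= t:
--             stage = s
--         else:
--             return stage, t
--     return stage, STAGES[12]
-- ===== SOURCE B (Python) =====
-- def get_stage(points):
--     thresholds = (300, 600, 1500, 2000, 3000, 4000, 5000, 6000, 7000, 8000, 9000, 10000)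
--     # binary search: lo = number of thresholds <= points = highest stage reached
--     lo, hi = 0, 12
--     while lo < hi:
--         mid = (lo + hi) // 2
--         if points >= thresholds[mid]:
--             lo = mid + 1
--         else:
--             hi = mid
--     if lo < 12:
--         return lo, thresholds[lo]
--     return 12, 10000
-- ===== Notes on version B (the rewrite author's own statement) =====
-- stated objective: alternative
-- what changed: Replaced the sequential scan over the STAGES dict with an index-based binary search (hand-rolled bisect_right) over the sorted threshold tuple, reading stage and next threshold from the found index.
import Mathlib
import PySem

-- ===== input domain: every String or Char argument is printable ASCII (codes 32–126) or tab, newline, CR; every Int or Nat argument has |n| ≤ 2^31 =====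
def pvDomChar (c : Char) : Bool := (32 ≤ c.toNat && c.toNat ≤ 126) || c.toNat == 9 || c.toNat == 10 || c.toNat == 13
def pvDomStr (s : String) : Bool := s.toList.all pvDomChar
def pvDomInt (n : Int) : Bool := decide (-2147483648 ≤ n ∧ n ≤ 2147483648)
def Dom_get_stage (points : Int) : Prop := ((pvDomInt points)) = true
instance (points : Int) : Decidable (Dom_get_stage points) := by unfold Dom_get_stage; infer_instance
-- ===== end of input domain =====

-- B replaces A's linear scan of the stage dict with a binary search over the sorted thresholds (alternative decomposition; same result).

-- ===== PORT A =====
def pvStages : List (Int × Int) :=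
  [(1,300),(2,600),(3,1500),(4,2000),(5,3000),(6,4000),(7,5000),(8,6000),(9,7000),(10,8000),(11,9000),(12,10000)]

def getStageLoop (points : Int) : List (Int × Int) → Int → Int × Int
  | [], stage => (stage, 10000)      -- falls through the loop: return stage, STAGES[12]
  | (s, t) :: rest, stage => if points ≥ t then getStageLoop points rest s else (stage, t)

def get_stage (points : Int) : Int × Int := getStageLoop points pvStages 0

-- ===== PORT B =====
def pvThresholds : List Int := [300,600,1500,2000,3000,4000,5000,6000,7000,8000,9000,10000]

-- the while lo < hi loop; the Nat fuel (12 ≥ hi - lo) only makes the recursion structural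
def bsLoop (points : Int) : Nat → Nat → Nat → Nat
  | 0, lo, _ => lo
  | fuel + 1, lo, hi =>
    if lo < hi then
      let mid := (lo + hi) / 2
      if points ≥ pvThresholds.getD mid 0 then bsLoop points fuel (mid + 1) hi
      else bsLoop points fuel lo mid
    else lo

def get_stage_alt (points : Int) : Int × Int :=
  let lo := bsLoop points 12 0 12
  if lo < 12 then ((lo : Int), pvThresholds.getD lo 0)   -- thresholds[lo], index lo < 12 always in range
  else (12, 10000)

-- ===== PRECONDITION & SPEC =====
def Spec_get_stage (points : Int) (out : Int × Int) : Prop := out = get_stage_alt points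
instance (points : Int) (out : Int × Int) : Decidable (Spec_get_stage points out) := by unfold Spec_get_stage; infer_instance

-- ===== CLAIM (what is proved, stated in full; the proofs are below) =====
def Claim_equal_get_stage : Prop := ∀ (points : Int), Dom_get_stage points → Spec_get_stage points (get_stage points)

-- ===== LEMMAS AND PROOFS =====
lemma bs_step (p : Int) (fuel lo hi : Nat) : bsLoop p (fuel+1) lo hi =
    if lo < hi then
      (if p ≥ pvThresholds.getD ((lo+hi)/2) 0 then bsLoop p fuel ((lo+hi)/2+1) hi
       else bsLoop p fuel lo ((lo+hi)/2)) else lo := rfl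

lemma bsCase0 (p : Int) (h2 : p < (300:Int)) : bsLoop p 12 0 12 = 0 := by
  rw [show (12:Nat)=11+1 from rfl, bs_step]
  norm_num [pvThresholds]
  rw [if_neg (show ¬((5000:Int) ≤ p) by omega)]
  rw [show (11:Nat)=10+1 from rfl, bs_step]
  norm_num [pvThresholds]
  rw [if_neg (show ¬((2000:Int) ≤ p) by omega)]
  rw [show (10:Nat)=9+1 from rfl, bs_step]
  norm_num [pvThresholds]
  rw [if_neg (show ¬((600:Int) ≤ p) by omega)]
  rw [show (9:Nat)=8+1 from rfl, bs_step]
  norm_num [pvThresholds]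
  rw [if_neg (show ¬((300:Int) ≤ p) by omega)]
  rw [show (8:Nat)=7+1 from rfl, bs_step]
  norm_num

lemma aCase0 (p : Int) (h2 : p < (300:Int)) : get_stage p = (0, 300) := by
  simp only [get_stage, pvStages, getStageLoop, ge_iff_le]
  norm_num [show ¬((300:Int) ≤ p) by omega]

lemma bCase0 (p : Int) (h2 : p < (300:Int)) : get_stage_alt p = (0, 300) := by
  simp only [get_stage_alt, bsCase0 p h2]
  norm_num [pvThresholds]

lemma bsCase1 (p : Int) (h1 : (300:Int) ≤ p) (h2 : p < (600:Int)) : bsLoop p 12 0 12 = 1 := by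
  rw [show (12:Nat)=11+1 from rfl, bs_step]
  norm_num [pvThresholds]
  rw [if_neg (show ¬((5000:Int) ≤ p) by omega)]
  rw [show (11:Nat)=10+1 from rfl, bs_step]
  norm_num [pvThresholds]
  rw [if_neg (show ¬((2000:Int) ≤ p) by omega)]
  rw [show (10:Nat)=9+1 from rfl, bs_step]
  norm_num [pvThresholds]
  rw [if_neg (show ¬((600:Int) ≤ p) by omega)]
  rw [show (9:Nat)=8+1 from rfl, bs_step]
  norm_num [pvThresholds]
  rw [if_pos (show ((300:Int) ≤ p) by omega)]
  rw [show (8:Nat)=7+1 from rfl, bs_step]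
  norm_num

lemma aCase1 (p : Int) (h1 : (300:Int) ≤ p) (h2 : p < (600:Int)) : get_stage p = (1, 600) := by
  simp only [get_stage, pvStages, getStageLoop, ge_iff_le]
  norm_num [show ((300:Int) ≤ p) by omega, show ¬((600:Int) ≤ p) by omega]

lemma bCase1 (p : Int) (h1 : (300:Int) ≤ p) (h2 : p < (600:Int)) : get_stage_alt p = (1, 600) := by
  simp only [get_stage_alt, bsCase1 p h1 h2]
  norm_num [pvThresholds]

lemma bsCase2 (p : Int) (h1 : (600:Int) ≤ p) (h2 : p < (1500:Int)) : bsLoop p 12 0 12 = 2 := by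
  rw [show (12:Nat)=11+1 from rfl, bs_step]
  norm_num [pvThresholds]
  rw [if_neg (show ¬((5000:Int) ≤ p) by omega)]
  rw [show (11:Nat)=10+1 from rfl, bs_step]
  norm_num [pvThresholds]
  rw [if_neg (show ¬((2000:Int) ≤ p) by omega)]
  rw [show (10:Nat)=9+1 from rfl, bs_step]
  norm_num [pvThresholds]
  rw [if_pos (show ((600:Int) ≤ p) by omega)]
  rw [show (9:Nat)=8+1 from rfl, bs_step]
  norm_num [pvThresholds]
  rw [if_neg (show ¬((1500:Int) ≤ p) by omega)]
  rw [show (8:Nat)=7+1 from rfl, bs_step]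
  norm_num

lemma aCase2 (p : Int) (h1 : (600:Int) ≤ p) (h2 : p < (1500:Int)) : get_stage p = (2, 1500) := by
  simp only [get_stage, pvStages, getStageLoop, ge_iff_le]
  norm_num [show ((300:Int) ≤ p) by omega, show ((600:Int) ≤ p) by omega, show ¬((1500:Int) ≤ p) by omega]

lemma bCase2 (p : Int) (h1 : (600:Int) ≤ p) (h2 : p < (1500:Int)) : get_stage_alt p = (2, 1500) := by
  simp only [get_stage_alt, bsCase2 p h1 h2]
  norm_num [pvThresholds]

lemma bsCase3 (p : Int) (h1 : (1500:Int) ≤ p) (h2 : p < (2000:Int)) : bsLoop p 12 0 12 = 3 := by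
  rw [show (12:Nat)=11+1 from rfl, bs_step]
  norm_num [pvThresholds]
  rw [if_neg (show ¬((5000:Int) ≤ p) by omega)]
  rw [show (11:Nat)=10+1 from rfl, bs_step]
  norm_num [pvThresholds]
  rw [if_neg (show ¬((2000:Int) ≤ p) by omega)]
  rw [show (10:Nat)=9+1 from rfl, bs_step]
  norm_num [pvThresholds]
  rw [if_pos (show ((600:Int) ≤ p) by omega)]
  rw [show (9:Nat)=8+1 from rfl, bs_step]
  norm_num [pvThresholds]
  rw [if_pos (show ((1500:Int) ≤ p) by omega)]
  rw [show (8:Nat)=7+1 from rfl, bs_step]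
  norm_num

lemma aCase3 (p : Int) (h1 : (1500:Int) ≤ p) (h2 : p < (2000:Int)) : get_stage p = (3, 2000) := by
  simp only [get_stage, pvStages, getStageLoop, ge_iff_le]
  norm_num [show ((300:Int) ≤ p) by omega, show ((600:Int) ≤ p) by omega, show ((1500:Int) ≤ p) by omega, show ¬((2000:Int) ≤ p) by omega]

lemma bCase3 (p : Int) (h1 : (1500:Int) ≤ p) (h2 : p < (2000:Int)) : get_stage_alt p = (3, 2000) := by
  simp only [get_stage_alt, bsCase3 p h1 h2]
  norm_num [pvThresholds]

lemma bsCase4 (p : Int) (h1 : (2000:Int) ≤ p) (h2 : p < (3000:Int)) : bsLoop p 12 0 12 = 4 := by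
  rw [show (12:Nat)=11+1 from rfl, bs_step]
  norm_num [pvThresholds]
  rw [if_neg (show ¬((5000:Int) ≤ p) by omega)]
  rw [show (11:Nat)=10+1 from rfl, bs_step]
  norm_num [pvThresholds]
  rw [if_pos (show ((2000:Int) ≤ p) by omega)]
  rw [show (10:Nat)=9+1 from rfl, bs_step]
  norm_num [pvThresholds]
  rw [if_neg (show ¬((4000:Int) ≤ p) by omega)]
  rw [show (9:Nat)=8+1 from rfl, bs_step]
  norm_num [pvThresholds]
  rw [if_neg (show ¬((3000:Int) ≤ p) by omega)]
  rw [show (8:Nat)=7+1 from rfl, bs_step]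
  norm_num

lemma aCase4 (p : Int) (h1 : (2000:Int) ≤ p) (h2 : p < (3000:Int)) : get_stage p = (4, 3000) := by
  simp only [get_stage, pvStages, getStageLoop, ge_iff_le]
  norm_num [show ((300:Int) ≤ p) by omega, show ((600:Int) ≤ p) by omega, show ((1500:Int) ≤ p) by omega, show ((2000:Int) ≤ p) by omega, show ¬((3000:Int) ≤ p) by omega]

lemma bCase4 (p : Int) (h1 : (2000:Int) ≤ p) (h2 : p < (3000:Int)) : get_stage_alt p = (4, 3000) := by
  simp only [get_stage_alt, bsCase4 p h1 h2]
  norm_num [pvThresholds]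

lemma bsCase5 (p : Int) (h1 : (3000:Int) ≤ p) (h2 : p < (4000:Int)) : bsLoop p 12 0 12 = 5 := by
  rw [show (12:Nat)=11+1 from rfl, bs_step]
  norm_num [pvThresholds]
  rw [if_neg (show ¬((5000:Int) ≤ p) by omega)]
  rw [show (11:Nat)=10+1 from rfl, bs_step]
  norm_num [pvThresholds]
  rw [if_pos (show ((2000:Int) ≤ p) by omega)]
  rw [show (10:Nat)=9+1 from rfl, bs_step]
  norm_num [pvThresholds]
  rw [if_neg (show ¬((4000:Int) ≤ p) by omega)]
  rw [show (9:Nat)=8+1 from rfl, bs_step]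
  norm_num [pvThresholds]
  rw [if_pos (show ((3000:Int) ≤ p) by omega)]
  rw [show (8:Nat)=7+1 from rfl, bs_step]
  norm_num

lemma aCase5 (p : Int) (h1 : (3000:Int) ≤ p) (h2 : p < (4000:Int)) : get_stage p = (5, 4000) := by
  simp only [get_stage, pvStages, getStageLoop, ge_iff_le]
  norm_num [show ((300:Int) ≤ p) by omega, show ((600:Int) ≤ p) by omega, show ((1500:Int) ≤ p) by omega, show ((2000:Int) ≤ p) by omega, show ((3000:Int) ≤ p) by omega, show ¬((4000:Int) ≤ p) by omega]

lemma bCase5 (p : Int) (h1 : (3000:Int) ≤ p) (h2 : p < (4000:Int)) : get_stage_alt p = (5, 4000) := by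
  simp only [get_stage_alt, bsCase5 p h1 h2]
  norm_num [pvThresholds]

lemma bsCase6 (p : Int) (h1 : (4000:Int) ≤ p) (h2 : p < (5000:Int)) : bsLoop p 12 0 12 = 6 := by
  rw [show (12:Nat)=11+1 from rfl, bs_step]
  norm_num [pvThresholds]
  rw [if_neg (show ¬((5000:Int) ≤ p) by omega)]
  rw [show (11:Nat)=10+1 from rfl, bs_step]
  norm_num [pvThresholds]
  rw [if_pos (show ((2000:Int) ≤ p) by omega)]
  rw [show (10:Nat)=9+1 from rfl, bs_step]
  norm_num [pvThresholds]
  rw [if_pos (show ((4000:Int) ≤ p) by omega)]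
  rw [show (9:Nat)=8+1 from rfl, bs_step]
  norm_num

lemma aCase6 (p : Int) (h1 : (4000:Int) ≤ p) (h2 : p < (5000:Int)) : get_stage p = (6, 5000) := by
  simp only [get_stage, pvStages, getStageLoop, ge_iff_le]
  norm_num [show ((300:Int) ≤ p) by omega, show ((600:Int) ≤ p) by omega, show ((1500:Int) ≤ p) by omega, show ((2000:Int) ≤ p) by omega, show ((3000:Int) ≤ p) by omega, show ((4000:Int) ≤ p) by omega, show ¬((5000:Int) ≤ p) by omega]

lemma bCase6 (p : Int) (h1 : (4000:Int) ≤ p) (h2 : p < (5000:Int)) : get_stage_alt p = (6, 5000) := by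
  simp only [get_stage_alt, bsCase6 p h1 h2]
  norm_num [pvThresholds]

lemma bsCase7 (p : Int) (h1 : (5000:Int) ≤ p) (h2 : p < (6000:Int)) : bsLoop p 12 0 12 = 7 := by
  rw [show (12:Nat)=11+1 from rfl, bs_step]
  norm_num [pvThresholds]
  rw [if_pos (show ((5000:Int) ≤ p) by omega)]
  rw [show (11:Nat)=10+1 from rfl, bs_step]
  norm_num [pvThresholds]
  rw [if_neg (show ¬((8000:Int) ≤ p) by omega)]
  rw [show (10:Nat)=9+1 from rfl, bs_step]
  norm_num [pvThresholds]
  rw [if_neg (show ¬((7000:Int) ≤ p) by omega)]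
  rw [show (9:Nat)=8+1 from rfl, bs_step]
  norm_num [pvThresholds]
  rw [if_neg (show ¬((6000:Int) ≤ p) by omega)]
  rw [show (8:Nat)=7+1 from rfl, bs_step]
  norm_num

lemma aCase7 (p : Int) (h1 : (5000:Int) ≤ p) (h2 : p < (6000:Int)) : get_stage p = (7, 6000) := by
  simp only [get_stage, pvStages, getStageLoop, ge_iff_le]
  norm_num [show ((300:Int) ≤ p) by omega, show ((600:Int) ≤ p) by omega, show ((1500:Int) ≤ p) by omega, show ((2000:Int) ≤ p) by omega, show ((3000:Int) ≤ p) by omega, show ((4000:Int) ≤ p) by omega, show ((5000:Int) ≤ p) by omega, show ¬((6000:Int) ≤ p) by omega]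

lemma bCase7 (p : Int) (h1 : (5000:Int) ≤ p) (h2 : p < (6000:Int)) : get_stage_alt p = (7, 6000) := by
  simp only [get_stage_alt, bsCase7 p h1 h2]
  norm_num [pvThresholds]

lemma bsCase8 (p : Int) (h1 : (6000:Int) ≤ p) (h2 : p < (7000:Int)) : bsLoop p 12 0 12 = 8 := by
  rw [show (12:Nat)=11+1 from rfl, bs_step]
  norm_num [pvThresholds]
  rw [if_pos (show ((5000:Int) ≤ p) by omega)]
  rw [show (11:Nat)=10+1 from rfl, bs_step]
  norm_num [pvThresholds]
  rw [if_neg (show ¬((8000:Int) ≤ p) by omega)]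
  rw [show (10:Nat)=9+1 from rfl, bs_step]
  norm_num [pvThresholds]
  rw [if_neg (show ¬((7000:Int) ≤ p) by omega)]
  rw [show (9:Nat)=8+1 from rfl, bs_step]
  norm_num [pvThresholds]
  rw [if_pos (show ((6000:Int) ≤ p) by omega)]
  rw [show (8:Nat)=7+1 from rfl, bs_step]
  norm_num

lemma aCase8 (p : Int) (h1 : (6000:Int) ≤ p) (h2 : p < (7000:Int)) : get_stage p = (8, 7000) := by
  simp only [get_stage, pvStages, getStageLoop, ge_iff_le]
  norm_num [show ((300:Int) ≤ p) by omega, show ((600:Int) ≤ p) by omega, show ((1500:Int) ≤ p) by omega, show ((2000:Int) ≤ p) by omega, show ((3000:Int) ≤ p) by omega, show ((4000:Int) ≤ p) by omega, show ((5000:Int) ≤ p) by omega, show ((6000:Int) ≤ p) by omega, show ¬((7000:Int) ≤ p) by omega]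

lemma bCase8 (p : Int) (h1 : (6000:Int) ≤ p) (h2 : p < (7000:Int)) : get_stage_alt p = (8, 7000) := by
  simp only [get_stage_alt, bsCase8 p h1 h2]
  norm_num [pvThresholds]

lemma bsCase9 (p : Int) (h1 : (7000:Int) ≤ p) (h2 : p < (8000:Int)) : bsLoop p 12 0 12 = 9 := by
  rw [show (12:Nat)=11+1 from rfl, bs_step]
  norm_num [pvThresholds]
  rw [if_pos (show ((5000:Int) ≤ p) by omega)]
  rw [show (11:Nat)=10+1 from rfl, bs_step]
  norm_num [pvThresholds]
  rw [if_neg (show ¬((8000:Int) ≤ p) by omega)]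
  rw [show (10:Nat)=9+1 from rfl, bs_step]
  norm_num [pvThresholds]
  rw [if_pos (show ((7000:Int) ≤ p) by omega)]
  rw [show (9:Nat)=8+1 from rfl, bs_step]
  norm_num

lemma aCase9 (p : Int) (h1 : (7000:Int) ≤ p) (h2 : p < (8000:Int)) : get_stage p = (9, 8000) := by
  simp only [get_stage, pvStages, getStageLoop, ge_iff_le]
  norm_num [show ((300:Int) ≤ p) by omega, show ((600:Int) ≤ p) by omega, show ((1500:Int) ≤ p) by omega, show ((2000:Int) ≤ p) by omega, show ((3000:Int) ≤ p) by omega, show ((4000:Int) ≤ p) by omega, show ((5000:Int) ≤ p) by omega, show ((6000:Int) ≤ p) by omega, show ((7000:Int) ≤ p) by omega, show ¬((8000:Int) ≤ p) by omega]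

lemma bCase9 (p : Int) (h1 : (7000:Int) ≤ p) (h2 : p < (8000:Int)) : get_stage_alt p = (9, 8000) := by
  simp only [get_stage_alt, bsCase9 p h1 h2]
  norm_num [pvThresholds]

lemma bsCase10 (p : Int) (h1 : (8000:Int) ≤ p) (h2 : p < (9000:Int)) : bsLoop p 12 0 12 = 10 := by
  rw [show (12:Nat)=11+1 from rfl, bs_step]
  norm_num [pvThresholds]
  rw [if_pos (show ((5000:Int) ≤ p) by omega)]
  rw [show (11:Nat)=10+1 from rfl, bs_step]
  norm_num [pvThresholds]
  rw [if_pos (show ((8000:Int) ≤ p) by omega)]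
  rw [show (10:Nat)=9+1 from rfl, bs_step]
  norm_num [pvThresholds]
  rw [if_neg (show ¬((10000:Int) ≤ p) by omega)]
  rw [show (9:Nat)=8+1 from rfl, bs_step]
  norm_num [pvThresholds]
  rw [if_neg (show ¬((9000:Int) ≤ p) by omega)]
  rw [show (8:Nat)=7+1 from rfl, bs_step]
  norm_num

lemma aCase10 (p : Int) (h1 : (8000:Int) ≤ p) (h2 : p < (9000:Int)) : get_stage p = (10, 9000) := by
  simp only [get_stage, pvStages, getStageLoop, ge_iff_le]
  norm_num [show ((300:Int) ≤ p) by omega, show ((600:Int) ≤ p) by omega, show ((1500:Int) ≤ p) by omega, show ((2000:Int) ≤ p) by omega, show ((3000:Int) ≤ p) by omega, show ((4000:Int) ≤ p) by omega, show ((5000:Int) ≤ p) by omega, show ((6000:Int) ≤ p) by omega, show ((7000:Int) ≤ p) by omega, show ((8000:Int) ≤ p) by omega, show ¬((9000:Int) ≤ p) by omega]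

lemma bCase10 (p : Int) (h1 : (8000:Int) ≤ p) (h2 : p < (9000:Int)) : get_stage_alt p = (10, 9000) := by
  simp only [get_stage_alt, bsCase10 p h1 h2]
  norm_num [pvThresholds]

lemma bsCase11 (p : Int) (h1 : (9000:Int) ≤ p) (h2 : p < (10000:Int)) : bsLoop p 12 0 12 = 11 := by
  rw [show (12:Nat)=11+1 from rfl, bs_step]
  norm_num [pvThresholds]
  rw [if_pos (show ((5000:Int) ≤ p) by omega)]
  rw [show (11:Nat)=10+1 from rfl, bs_step]
  norm_num [pvThresholds]
  rw [if_pos (show ((8000:Int) ≤ p) by omega)]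
  rw [show (10:Nat)=9+1 from rfl, bs_step]
  norm_num [pvThresholds]
  rw [if_neg (show ¬((10000:Int) ≤ p) by omega)]
  rw [show (9:Nat)=8+1 from rfl, bs_step]
  norm_num [pvThresholds]
  rw [if_pos (show ((9000:Int) ≤ p) by omega)]
  rw [show (8:Nat)=7+1 from rfl, bs_step]
  norm_num

lemma aCase11 (p : Int) (h1 : (9000:Int) ≤ p) (h2 : p < (10000:Int)) : get_stage p = (11, 10000) := by
  simp only [get_stage, pvStages, getStageLoop, ge_iff_le]
  norm_num [show ((300:Int) ≤ p) by omega, show ((600:Int) ≤ p) by omega, show ((1500:Int) ≤ p) by omega, show ((2000:Int) ≤ p) by omega, show ((3000:Int) ≤ p) by omega, show ((4000:Int) ≤ p) by omega, show ((5000:Int) ≤ p) by omega, show ((6000:Int) ≤ p) by omega, show ((7000:Int) ≤ p) by omega, show ((8000:Int) ≤ p) by omega, show ((9000:Int) ≤ p) by omega, show ¬((10000:Int) ≤ p) by omega]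

lemma bCase11 (p : Int) (h1 : (9000:Int) ≤ p) (h2 : p < (10000:Int)) : get_stage_alt p = (11, 10000) := by
  simp only [get_stage_alt, bsCase11 p h1 h2]
  norm_num [pvThresholds]

lemma bsCase12 (p : Int) (h1 : (10000:Int) ≤ p) : bsLoop p 12 0 12 = 12 := by
  rw [show (12:Nat)=11+1 from rfl, bs_step]
  norm_num [pvThresholds]
  rw [if_pos (show ((5000:Int) ≤ p) by omega)]
  rw [show (11:Nat)=10+1 from rfl, bs_step]
  norm_num [pvThresholds]
  rw [if_pos (show ((8000:Int) ≤ p) by omega)]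
  rw [show (10:Nat)=9+1 from rfl, bs_step]
  norm_num [pvThresholds]
  rw [if_pos (show ((10000:Int) ≤ p) by omega)]
  rw [show (9:Nat)=8+1 from rfl, bs_step]
  norm_num

lemma aCase12 (p : Int) (h1 : (10000:Int) ≤ p) : get_stage p = (12, 10000) := by
  simp only [get_stage, pvStages, getStageLoop, ge_iff_le]
  norm_num [show ((300:Int) ≤ p) by omega, show ((600:Int) ≤ p) by omega, show ((1500:Int) ≤ p) by omega, show ((2000:Int) ≤ p) by omega, show ((3000:Int) ≤ p) by omega, show ((4000:Int) ≤ p) by omega, show ((5000:Int) ≤ p) by omega, show ((6000:Int) ≤ p) by omega, show ((7000:Int) ≤ p) by omega, show ((8000:Int) ≤ p) by omega, show ((9000:Int) ≤ p) by omega, show ((10000:Int) ≤ p) by omega]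

lemma bCase12 (p : Int) (h1 : (10000:Int) ≤ p) : get_stage_alt p = (12, 10000) := by
  simp only [get_stage_alt, bsCase12 p h1 ]
  norm_num [pvThresholds]

-- ===== VERDICT (by name: the statement is the Claim_ definition above) =====
theorem get_stage_spec : Claim_equal_get_stage := by
  intro p _
  unfold Spec_get_stage
  by_cases c0 : p < (300:Int)
  · rw [aCase0 p c0, bCase0 p c0]
  by_cases c1 : p < (600:Int)
  · rw [aCase1 p (by omega) c1, bCase1 p (by omega) c1]
  by_cases c2 : p < (1500:Int)
  · rw [aCase2 p (by omega) c2, bCase2 p (by omega) c2]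
  by_cases c3 : p < (2000:Int)
  · rw [aCase3 p (by omega) c3, bCase3 p (by omega) c3]
  by_cases c4 : p < (3000:Int)
  · rw [aCase4 p (by omega) c4, bCase4 p (by omega) c4]
  by_cases c5 : p < (4000:Int)
  · rw [aCase5 p (by omega) c5, bCase5 p (by omega) c5]
  by_cases c6 : p < (5000:Int)
  · rw [aCase6 p (by omega) c6, bCase6 p (by omega) c6]
  by_cases c7 : p < (6000:Int)
  · rw [aCase7 p (by omega) c7, bCase7 p (by omega) c7]
  by_cases c8 : p < (7000:Int)
  · rw [aCase8 p (by omega) c8, bCase8 p (by omega) c8]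
  by_cases c9 : p < (8000:Int)
  · rw [aCase9 p (by omega) c9, bCase9 p (by omega) c9]
  by_cases c10 : p < (9000:Int)
  · rw [aCase10 p (by omega) c10, bCase10 p (by omega) c10]
  by_cases c11 : p < (10000:Int)
  · rw [aCase11 p (by omega) c11, bCase11 p (by omega) c11]
  rw [aCase12 p (by omega), bCase12 p (by omega)]
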